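-- pv_equiv track=rewrite | github.com/umoqnier/cl-2024-1-lab | LeninPavonAlvarez/p04-zipf/p04-zipf.py | get_ngram
-- ===== SOURCE A (Python) =====
-- def get_ngram(corpus: list[str],n: int = 2)->list:
--     """
--     Creates corpus of n-grams from a corpus of words
--     """
--     count = 0
--     ngrams = []
--     current = ""
--     for word in corpus:
--         for char in word:
--             count += 1
--             current += char
--             if count == n:
--                 ngrams.append(current)
--                 current = ""
--                 count = 0
--     return ngrams
-- ===== SOURCE B (Python) =====
-- def get_ngram(corpus: list[str], n: int = 2) -> list:
--     """
--     Creates corpus of n-grams from a corpus of words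
--     """
--     if n <= 0:
--         return []
--     text = "".join(corpus)
--     out = []
--     while len(text) >= n:
--         out.append(text[:n])
--         text = text[n:]
--     return out
-- ===== Notes on version B (the rewrite author's own statement) =====
-- stated objective: simpler
-- what changed: B joins the corpus into one string and repeatedly slices off length-n prefixes, instead of A's per-character loop with a running counter and character-by-character string building.
import Mathlib
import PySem

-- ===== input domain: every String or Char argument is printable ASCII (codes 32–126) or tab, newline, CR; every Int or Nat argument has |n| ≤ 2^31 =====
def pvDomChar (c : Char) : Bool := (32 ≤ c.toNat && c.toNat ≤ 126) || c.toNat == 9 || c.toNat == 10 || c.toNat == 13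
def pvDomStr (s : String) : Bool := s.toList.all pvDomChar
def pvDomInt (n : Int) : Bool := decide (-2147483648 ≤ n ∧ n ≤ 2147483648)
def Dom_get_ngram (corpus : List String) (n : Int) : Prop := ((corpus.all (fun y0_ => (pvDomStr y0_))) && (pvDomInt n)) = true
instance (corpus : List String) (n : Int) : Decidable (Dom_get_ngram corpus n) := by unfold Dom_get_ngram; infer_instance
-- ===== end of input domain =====

-- B joins the corpus into one string and slices off length-n prefixes (simpler); A counts characters one by one.

-- ===== PORT A =====
-- state: (count, ngrams, current); current kept as List Char (Python builds it by += char)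
def pvStepA (n : Int) (st : Int × List String × List Char) (char : Char) : Int × List String × List Char :=
  let count := st.1 + 1
  let current := st.2.2 ++ [char]
  if count = n then (0, st.2.1 ++ [String.ofList current], [])
  else (count, st.2.1, current)

def get_ngram (corpus : List String) (n : Int) : List String :=
  (corpus.foldl (fun st word => word.toList.foldl (pvStepA n) st) (0, [], [])).2.1

-- ===== PORT B =====
-- while len(text) >= n: emit text[:n]; text = text[n:]
def pvChunks (m : Nat) (t : List Char) : List String :=
  if 0 < m ∧ m ≤ t.length then
    String.ofList (t.take m) :: pvChunks m (t.drop m)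
  else []
termination_by t.length
decreasing_by
  simp only [List.length_drop]
  omega

def get_ngram_alt (corpus : List String) (n : Int) : List String :=
  if n ≤ 0 then []
  else pvChunks n.toNat (String.join corpus).toList

-- ===== PRECONDITION & SPEC =====
def Spec_get_ngram (corpus : List String) (n : Int) (out : List String) : Prop := out = get_ngram_alt corpus n
instance (corpus : List String) (n : Int) (out : List String) : Decidable (Spec_get_ngram corpus n out) := by unfold Spec_get_ngram; infer_instance

-- ===== CLAIM (what is proved, stated in full; the proofs are below) =====
def Claim_equal_get_ngram : Prop := ∀ (corpus : List String) (n : Int), Dom_get_ngram corpus n → Spec_get_ngram corpus n (get_ngram corpus n)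

-- ===== LEMMAS AND PROOFS =====

-- ''.join(corpus) seen as a flat character list
theorem pv_join_foldl_toList (l : List String) (s : String) :
    (l.foldl (· ++ ·) s).toList = s.toList ++ (l.map String.toList).flatten := by
  induction l generalizing s with
  | nil => simp
  | cons x xs ih => simp [List.foldl_cons, ih, String.toList_append]

theorem pv_join_toList (l : List String) :
    (String.join l).toList = (l.map String.toList).flatten := by
  simpa using pv_join_foldl_toList l ""

-- A's nested loop is the character loop over the flattened corpus
theorem pv_nested_foldl (corpus : List String) (n : Int) (s : Int × List String × List Char) :
    corpus.foldl (fun st word => word.toList.foldl (pvStepA n) st) s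
      = ((corpus.map String.toList).flatten).foldl (pvStepA n) s := by
  rw [List.foldl_flatten, List.foldl_map]

-- n ≤ 0: the counter starts ≥ 0, so count == n never fires and ngrams stays put
theorem pv_loop_nonpos (n : Int) (hn : n ≤ 0) (l : List Char) (c : Int) (hc : 0 ≤ c)
    (acc : List String) (cur : List Char) :
    (l.foldl (pvStepA n) (c, acc, cur)).2.1 = acc := by
  induction l generalizing c cur with
  | nil => rfl
  | cons ch rest ih =>
    have hne : ¬ (c + 1 = n) := by omega
    simp only [List.foldl_cons, pvStepA, hne, if_false]
    exact ih (c + 1) (by omega) _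

theorem pv_chunks_short (m : Nat) (t : List Char) (h : t.length < m) : pvChunks m t = [] := by
  rw [pvChunks, if_neg (by omega)]

-- n > 0: invariant — counter = length of current chunk; ngrams output is acc ++ chunks of (current ++ rest)
theorem pv_loop_pos (m : Nat) (hm : 0 < m) (l : List Char) (cur : List Char) (hc : cur.length < m)
    (acc : List String) :
    (l.foldl (pvStepA (m : Int)) ((cur.length : Int), acc, cur)).2.1
      = acc ++ pvChunks m (cur ++ l) := by
  induction l generalizing cur acc with
  | nil =>
    rw [List.foldl_nil, List.append_nil, pv_chunks_short m cur hc, List.append_nil]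
  | cons ch rest ih =>
    by_cases he : cur.length + 1 = m
    · have hcond : ((cur.length : Int) + 1 = (m : Int)) := by exact_mod_cast he
      simp only [List.foldl_cons, pvStepA, hcond, reduceIte]
      have h0 : ((0 : Int)) = (([] : List Char).length : Int) := by simp
      rw [h0, ih [] (by omega)]
      have hsplit : cur ++ ch :: rest = (cur ++ [ch]) ++ rest := by simp
      have hlen : (cur ++ [ch]).length = m := by simp [he]
      have key : pvChunks m (cur ++ ch :: rest)
          = String.ofList (cur ++ [ch]) :: pvChunks m rest := by
        rw [hsplit, pvChunks, if_pos (show 0 < m ∧ m ≤ ((cur ++ [ch]) ++ rest).length by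
          refine ⟨hm, ?_⟩; simp; omega)]
        rw [List.take_left' hlen, List.drop_left' hlen]
      rw [key]
      simp
    · have hcond : ¬ ((cur.length : Int) + 1 = (m : Int)) := by
        intro h; exact he (by exact_mod_cast h)
      simp only [List.foldl_cons, pvStepA, hcond, if_false]
      have hlen1 : ((cur.length : Int) + 1) = (((cur ++ [ch]).length : Nat) : Int) := by
        simp
      rw [hlen1, ih (cur ++ [ch]) (by simp; omega)]
      simp

-- ===== VERDICT (by name: the statement is the Claim_ definition above) =====
theorem get_ngram_spec : Claim_equal_get_ngram := by
  intro corpus n _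
  unfold Spec_get_ngram get_ngram get_ngram_alt
  rw [pv_nested_foldl]
  by_cases hn : n ≤ 0
  · rw [if_pos hn]
    exact pv_loop_nonpos n hn _ 0 le_rfl [] []
  · rw [if_neg hn]
    obtain ⟨m, rfl⟩ : ∃ m : Nat, n = (m : Int) := ⟨n.toNat, by omega⟩
    have hm : 0 < m := by omega
    have := pv_loop_pos m hm ((corpus.map String.toList).flatten) [] (by simpa using hm) []
    simpa [pv_join_toList] using this
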